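-- pv_equiv track=rewrite | github.com/bureson2/PythonScripts | ciphers/affine_cipher_encoder.py | affine_cipher_encrypt
-- ===== SOURCE A (Python) =====
-- import string
--
-- def gcd(a, b):
--     while b:
--         a, b = b, a % b
--     return a
--
-- def affine_cipher_encrypt(text, a, b):
--     if gcd(a, 26) != 1:
--         return None
--     encrypted_text = ''
--     for char in text.lower():
--         if char in string.ascii_lowercase:
--             x = ord(char) - ord('a')
--             encrypted_char = chr(((a * x + b) % 26) + ord('a'))
--             encrypted_text += encrypted_char
--         else:
--             encrypted_text += char
--     return encrypted_text
-- ===== SOURCE B (Python) =====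
-- def affine_cipher_encrypt(text, a, b):
--     # a is invertible mod 26 iff some i in 0..25 satisfies a*i % 26 == 1
--     if not any(a * i % 26 == 1 for i in range(26)):
--         return None
--     # build the substitution alphabet once, by repeated addition of a (no per-character arithmetic)
--     cipher = []
--     y = b % 26
--     for _ in range(26):
--         cipher.append(chr(97 + y))
--         y = (y + a) % 26
--     plain = 'abcdefghijklmnopqrstuvwxyz'
--     out = []
--     for ch in text.lower():
--         i = plain.find(ch)
--         out.append(cipher[i] if i >= 0 else ch)
--     return ''.join(out)
-- ===== Notes on version B (the rewrite author's own statement) =====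
-- stated objective: alternative
-- what changed: B checks invertibility by searching for a modular inverse of a instead of running A's gcd loop, and replaces A's per-character affine arithmetic with a substitution alphabet built once by repeated addition of a, each character then mapped through its plain-alphabet index (str.find) with list-append-and-join instead of string concatenation.
import Mathlib
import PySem

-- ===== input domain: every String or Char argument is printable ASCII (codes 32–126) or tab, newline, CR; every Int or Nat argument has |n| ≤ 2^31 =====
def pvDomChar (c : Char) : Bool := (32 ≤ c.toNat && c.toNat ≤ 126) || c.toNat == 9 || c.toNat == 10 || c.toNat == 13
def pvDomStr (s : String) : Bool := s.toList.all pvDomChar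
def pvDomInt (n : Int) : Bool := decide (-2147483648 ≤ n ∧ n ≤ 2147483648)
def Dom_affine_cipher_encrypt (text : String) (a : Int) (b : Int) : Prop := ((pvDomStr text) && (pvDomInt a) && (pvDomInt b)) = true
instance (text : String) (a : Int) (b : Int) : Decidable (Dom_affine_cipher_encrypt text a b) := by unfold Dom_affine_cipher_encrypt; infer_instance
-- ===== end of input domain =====

-- B replaces A's gcd-loop guard by a search for a modular inverse, and A's per-character
-- affine arithmetic by a substitution alphabet built once by repeated addition of a,
-- each character then mapped via its index in the plain alphabet (objective: alternative).

-- ===== PORT A =====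
-- string.ascii_lowercase
def pvAsciiLowercase : List Char :=
  ['a','b','c','d','e','f','g','h','i','j','k','l','m','n','o','p','q','r','s','t','u','v','w','x','y','z']

-- A's helper gcd(a, b): a literal port of the while loop
def pvGcd (a b : Int) : Int :=
  if hb : b = 0 then a else pvGcd b (PySem.Int.mod a b)
termination_by b.natAbs
decreasing_by
  rcases lt_trichotomy b 0 with h | h | h
  · have := PySem.Int.mod_neg_bounds (a := a) h; omega
  · exact absurd h hb
  · have h1 := PySem.Int.mod_nonneg (a := a) h
    have h2 := PySem.Int.mod_lt (a := a) h
    omega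

def affine_cipher_encrypt (text : String) (a : Int) (b : Int) : Option String :=
  if pvGcd a 26 ≠ 1 then none
  else
    some (String.ofList ((PySem.Chars.lower text.toList).foldl
      (fun acc c =>
        if PySem.Chars.isIn [c] pvAsciiLowercase then
          acc ++ [Char.ofNat ((PySem.Int.mod (a * ((c.toNat : Int) - 97) + b) 26 + 97).toNat)]
        else
          acc ++ [c]) []))

-- ===== PORT B =====
def affine_cipher_encrypt_alt (text : String) (a : Int) (b : Int) : Option String :=
  if !((PySem.List.pyRange 0 26 1).any (fun i => PySem.Int.mod (a * i) 26 == 1)) then none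
  else
    -- cipher alphabet built by repeated addition of a, starting from b % 26
    let st := (PySem.List.pyRange 0 26 1).foldl
      (fun (st : List Char × Int) _ =>
        (st.1 ++ [Char.ofNat (97 + st.2).toNat], PySem.Int.mod (st.2 + a) 26))
      ([], PySem.Int.mod b 26)
    let cipher := st.1
    some (String.ofList ((PySem.Chars.lower text.toList).foldl
      (fun out c =>
        let i := PySem.Chars.find pvAsciiLowercase [c]
        out ++ [if 0 ≤ i then (PySem.List.pyGet? cipher i).getD c else c]) []))

-- ===== PRECONDITION & SPEC =====
def Spec_affine_cipher_encrypt (text : String) (a : Int) (b : Int) (out : Option String) : Prop := out = affine_cipher_encrypt_alt text a b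
instance (text : String) (a : Int) (b : Int) (out : Option String) : Decidable (Spec_affine_cipher_encrypt text a b out) := by unfold Spec_affine_cipher_encrypt; infer_instance

-- ===== CLAIM (what is proved, stated in full; the proofs are below) =====
def Claim_equal_affine_cipher_encrypt : Prop := ∀ (text : String) (a : Int) (b : Int), Dom_affine_cipher_encrypt text a b → Spec_affine_cipher_encrypt text a b (affine_cipher_encrypt text a b)

-- ===== LEMMAS AND PROOFS =====

-- A's guard gcd(a, 26) == 1 is exactly B's "a has an inverse mod 26" search
theorem pvGuard (a : Int) :
    (pvGcd a 26 = 1) ↔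
      ((PySem.List.pyRange 0 26 1).any (fun i => PySem.Int.mod (a * i) 26 == 1) = true) := by
  have h26 : (0:Int) < 26 := by norm_num
  rw [show pvGcd a 26 = pvGcd 26 (PySem.Int.mod a 26) from by rw [pvGcd]; simp]
  have key : ∀ i : Int, PySem.Int.mod (a * i) 26 = PySem.Int.mod (PySem.Int.mod a 26 * i) 26 := by
    intro i
    rw [PySem.Int.mod_eq_emod_of_pos h26, PySem.Int.mod_eq_emod_of_pos h26,
      PySem.Int.mod_eq_emod_of_pos h26, Int.mul_emod a i, Int.mul_emod (a % 26) i,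
      Int.emod_emod_of_dvd _ dvd_rfl]
  simp only [key]
  have hlo := PySem.Int.mod_nonneg (a := a) h26
  have hhi := PySem.Int.mod_lt (a := a) h26
  set r := PySem.Int.mod a 26 with hr
  clear_value r
  interval_cases r <;> simp [pvGcd, PySem.Int.mod, PySem.List.pyRange] <;> decide

-- B's cipher-alphabet fold builds [chr(97 + (b + a*k) % 26) for k in range(n)]
theorem pvBuild (a b : Int) (n : Nat) :
    (PySem.List.pyRange 0 (n : Int) 1).foldl
      (fun (st : List Char × Int) _ =>
        (st.1 ++ [Char.ofNat (97 + st.2).toNat], PySem.Int.mod (st.2 + a) 26))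
      ([], PySem.Int.mod b 26)
    = ((List.range n).map (fun k : Nat => Char.ofNat (97 + (b + a * (k : Int)) % 26).toNat),
       (b + a * n) % 26) := by
  induction n with
  | zero =>
      simp [PySem.List.pyRange_one_eq_nil (by norm_num : (0 : Int) ≤ 0)]
  | succ n ih =>
      rw [show ((n+1 : Nat) : Int) = (n : Int) + 1 from by push_cast; ring,
        PySem.List.pyRange_one_succ_right (by positivity), List.foldl_append, ih]
      simp only [List.foldl_cons, List.foldl_nil]
      rw [Prod.mk.injEq]
      refine ⟨?_, ?_⟩
      · rw [List.range_succ, List.map_append]; simp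
      · rw [PySem.Int.mod_eq_emod_of_pos (by norm_num : (0:Int) < 26)]
        have h : b + a * ((n : Int) + 1) = (b + a * n) + a := by ring
        rw [h]
        generalize (b + a * (n : Int)) = x
        omega

-- the plain-alphabet index of a lowercase letter
theorem pvFindMem (c : Char) (h : c ∈ pvAsciiLowercase) :
    PySem.Chars.find pvAsciiLowercase [c] = ((c.toNat - 97 : Nat) : Int) ∧
      97 ≤ c.toNat ∧ c.toNat < 123 := by
  fin_cases h <;> exact ⟨by decide, by decide, by decide⟩

-- a non-letter is not found in the plain alphabet
theorem pvFindNotMem (c : Char) (h : c ∉ pvAsciiLowercase) :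
    PySem.Chars.find pvAsciiLowercase [c] = -1 := by
  rw [PySem.Chars.find_eq_neg_one_iff]
  exact fun hinf => h (hinf.subset (List.mem_singleton_self c))

-- a single character through B's table = A's branch
theorem pvChar (a b : Int) (c : Char) :
    (if 0 ≤ PySem.Chars.find pvAsciiLowercase [c] then
        (PySem.List.pyGet?
          ((List.range 26).map (fun k : Nat => Char.ofNat (97 + (b + a * (k : Int)) % 26).toNat))
          (PySem.Chars.find pvAsciiLowercase [c])).getD c
      else c)
    = (if PySem.Chars.isIn [c] pvAsciiLowercase then
        Char.ofNat ((PySem.Int.mod (a * ((c.toNat : Int) - 97) + b) 26 + 97).toNat)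
      else c) := by
  by_cases h : c ∈ pvAsciiLowercase
  · obtain ⟨hf, hlo, hhi⟩ := pvFindMem c h
    have hin : PySem.Chars.isIn [c] pvAsciiLowercase = true := by
      rw [PySem.Chars.isIn_iff_infix, List.singleton_infix_iff]
      exact h
    rw [hf, if_pos (by positivity), if_pos hin,
      PySem.List.pyGet?_natCast,
      List.getElem?_map, List.getElem?_range (by omega : c.toNat - 97 < 26)]
    simp only [Option.map_some, Option.getD_some]
    have hx : ((c.toNat : Int) - 97) = ((c.toNat - 97 : Nat) : Int) := by omega
    rw [hx, PySem.Int.mod_eq_emod_of_pos (by norm_num : (0:Int) < 26)]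
    congr 1
    have h2 : a * ((c.toNat - 97 : Nat) : Int) + b = b + a * ((c.toNat - 97 : Nat) : Int) := by ring
    rw [h2]
    generalize (b + a * ((c.toNat - 97 : Nat) : Int)) = y
    omega
  · have hf := pvFindNotMem c h
    rw [hf]
    rw [if_neg (by norm_num), if_neg ?_]
    intro hin
    exact h (((PySem.Chars.isIn_iff_infix _ _).1 hin).subset (List.mem_singleton_self c))

-- ===== VERDICT (by name: the statement is the Claim_ definition above) =====
theorem affine_cipher_encrypt_spec : Claim_equal_affine_cipher_encrypt := by
  intro text a b _
  unfold Spec_affine_cipher_encrypt affine_cipher_encrypt affine_cipher_encrypt_alt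
  by_cases hg : pvGcd a 26 = 1
  · have hB : ((PySem.List.pyRange 0 26 1).any (fun i => PySem.Int.mod (a * i) 26 == 1)) = true :=
      (pvGuard a).1 hg
    rw [if_neg (by simpa using hg), if_neg (by rw [hB]; decide)]
    simp only [Option.some.injEq]
    have hb := pvBuild a b 26
    rw [show ((26:Nat):Int) = 26 from rfl] at hb
    rw [hb]
    congr 1
    rw [show (fun (acc : List Char) c =>
          if PySem.Chars.isIn [c] pvAsciiLowercase then
            acc ++ [Char.ofNat ((PySem.Int.mod (a * ((c.toNat : Int) - 97) + b) 26 + 97).toNat)]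
          else acc ++ [c])
        = (fun acc c => acc ++
            [if PySem.Chars.isIn [c] pvAsciiLowercase then
              Char.ofNat ((PySem.Int.mod (a * ((c.toNat : Int) - 97) + b) 26 + 97).toNat)
            else c]) from funext fun acc => funext fun c => by split <;> rfl]
    rw [show (fun (out : List Char) c =>
          let i := PySem.Chars.find pvAsciiLowercase [c]
          out ++ [if 0 ≤ i then
            (PySem.List.pyGet?
              ((List.range 26).map (fun k : Nat => Char.ofNat (97 + (b + a * (k : Int)) % 26).toNat)) i).getD c
          else c])
        = (fun out c => out ++
            [if 0 ≤ PySem.Chars.find pvAsciiLowercase [c] then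
              (PySem.List.pyGet?
                ((List.range 26).map (fun k : Nat => Char.ofNat (97 + (b + a * (k : Int)) % 26).toNat))
                (PySem.Chars.find pvAsciiLowercase [c])).getD c
            else c]) from rfl]
    rw [PySem.List.foldl_append_singleton_eq_map, PySem.List.foldl_append_singleton_eq_map,
      List.nil_append, List.nil_append]
    exact (List.map_congr_left fun c _ => pvChar a b c).symm
  · have hB : ((PySem.List.pyRange 0 26 1).any (fun i => PySem.Int.mod (a * i) 26 == 1)) = false :=
      eq_false_of_ne_true (fun h => hg ((pvGuard a).2 h))
    rw [if_pos (by simpa using hg), if_pos (by rw [hB]; decide)]
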